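-- pv_equiv track=rewrite | github.com/shubiduba1212/Coding_Basic | 프로그래머스/0/120837. 개미 군단/개미 군단.py | solution
-- ===== SOURCE A (Python) =====
-- def solution(hp):
--     answer = 0
--
--     while hp > 0:
--         if hp // 5 >= 1 :
--             answer += int(hp // 5)
--             hp %= 5
--
--         elif hp // 3 >= 1 :
--             answer += int(hp // 3)
--             hp %= 3
--
--         else :
--             answer += hp // 1
--             hp %= 1
--
--     return answer
-- ===== SOURCE B (Python) =====
-- def solution(hp):
--     if hp <= 0:
--         return 0
--     return hp // 5 + (hp % 5) // 3 + (hp % 5) % 3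
-- ===== Notes on version B (the rewrite author's own statement) =====
-- stated objective: simpler
-- what changed: Replaced the greedy while-loop that mutates hp with a guard plus a closed-form arithmetic expression hp//5 + (hp%5)//3 + (hp%5)%3.
import Mathlib
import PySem

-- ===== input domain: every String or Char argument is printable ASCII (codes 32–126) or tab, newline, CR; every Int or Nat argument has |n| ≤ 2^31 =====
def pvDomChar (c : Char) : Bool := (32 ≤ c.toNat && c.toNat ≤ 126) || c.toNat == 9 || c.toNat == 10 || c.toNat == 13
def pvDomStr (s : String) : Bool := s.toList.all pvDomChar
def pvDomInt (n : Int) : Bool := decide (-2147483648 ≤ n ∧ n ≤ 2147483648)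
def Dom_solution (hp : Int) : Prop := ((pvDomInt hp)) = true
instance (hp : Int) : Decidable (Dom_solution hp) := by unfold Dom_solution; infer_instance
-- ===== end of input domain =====

-- B replaces A's greedy while-loop by a guard plus the closed form hp//5 + (hp%5)//3 + (hp%5)%3 (simpler; same O(1) cost).

-- ===== PORT A =====
-- A's while-loop, state (answer, hp); fuel only makes the recursion total (hp strictly
-- decreases each iteration, so hp.toNat + 1 units never run out); int(hp // 5) on an int is the identity
def solutionGo (fuel : Nat) (answer hp : Int) : Int :=
  match fuel with
  | 0 => answer
  | fuel + 1 =>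
    if hp > 0 then
      if PySem.Int.floordiv hp 5 ≥ 1 then
        solutionGo fuel (answer + PySem.Int.floordiv hp 5) (PySem.Int.mod hp 5)
      else if PySem.Int.floordiv hp 3 ≥ 1 then
        solutionGo fuel (answer + PySem.Int.floordiv hp 3) (PySem.Int.mod hp 3)
      else
        solutionGo fuel (answer + PySem.Int.floordiv hp 1) (PySem.Int.mod hp 1)
    else answer

def solution (hp : Int) : Int := solutionGo (hp.toNat + 1) 0 hp

-- ===== PORT B =====
def solution_alt (hp : Int) : Int :=
  if hp ≤ 0 then 0
  else PySem.Int.floordiv hp 5 + PySem.Int.floordiv (PySem.Int.mod hp 5) 3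
       + PySem.Int.mod (PySem.Int.mod hp 5) 3

-- ===== PRECONDITION & SPEC =====
def Spec_solution (hp : Int) (out : Int) : Prop := out = solution_alt hp
instance (hp : Int) (out : Int) : Decidable (Spec_solution hp out) := by unfold Spec_solution; infer_instance

-- ===== CLAIM (what is proved, stated in full; the proofs are below) =====
def Claim_equal_solution : Prop := ∀ (hp : Int), Dom_solution hp → Spec_solution hp (solution hp)

-- ===== LEMMAS AND PROOFS =====
theorem solutionGo_eq (fuel : Nat) :
    ∀ (answer hp : Int), hp.toNat < fuel → solutionGo fuel answer hp = answer + solution_alt hp := by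
  have m5 : ∀ a : Int, PySem.Int.mod a 5 = a % 5 :=
    fun a => PySem.Int.mod_eq_emod_of_pos (by norm_num)
  have m3 : ∀ a : Int, PySem.Int.mod a 3 = a % 3 :=
    fun a => PySem.Int.mod_eq_emod_of_pos (by norm_num)
  have m1 : ∀ a : Int, PySem.Int.mod a 1 = a % 1 :=
    fun a => PySem.Int.mod_eq_emod_of_pos (by norm_num)
  have d5 : ∀ a : Int, PySem.Int.floordiv a 5 = a / 5 :=
    fun a => PySem.Int.floordiv_eq_ediv_of_pos (by norm_num)
  have d3 : ∀ a : Int, PySem.Int.floordiv a 3 = a / 3 :=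
    fun a => PySem.Int.floordiv_eq_ediv_of_pos (by norm_num)
  have d1 : ∀ a : Int, PySem.Int.floordiv a 1 = a / 1 :=
    fun a => PySem.Int.floordiv_eq_ediv_of_pos (by norm_num)
  induction fuel with
  | zero => intro answer hp h; omega
  | succ fuel ih =>
    intro answer hp h
    by_cases hpos : hp > 0
    · simp only [solutionGo, if_pos hpos]
      by_cases h5 : PySem.Int.floordiv hp 5 ≥ 1
      · rw [if_pos h5, ih _ _ (by rw [m5]; rw [d5] at h5; omega)]
        simp only [solution_alt, m5, m3, m1, d5, d3, d1] at *
        split_ifs <;> omega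
      · rw [if_neg h5]
        by_cases h3 : PySem.Int.floordiv hp 3 ≥ 1
        · rw [if_pos h3, ih _ _ (by rw [m3]; rw [d3] at h3; omega)]
          simp only [solution_alt, m5, m3, m1, d5, d3, d1] at *
          split_ifs <;> omega
        · rw [if_neg h3, ih _ _ (by rw [m1]; omega)]
          simp only [solution_alt, m5, m3, m1, d5, d3, d1] at *
          split_ifs <;> omega
    · have h0 : hp ≤ 0 := by omega
      simp [solutionGo, hpos, solution_alt, h0]

-- ===== VERDICT (by name: the statement is the Claim_ definition above) =====
theorem solution_spec : Claim_equal_solution := by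
  intro hp _
  unfold Spec_solution solution
  rw [solutionGo_eq _ _ _ (by omega)]
  ring
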